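-- pv_equiv track=rewrite | github.com/dayongkr/problem-solving | 프로그래머스/2/42626. 더 맵게/더 맵게.py | solution
-- ===== SOURCE A (Python) =====
-- import heapq
--
-- def solution(scoville, K):
--     heapq.heapify(scoville)
--     result = 0
--
--     while scoville:
--         first = heapq.heappop(scoville)
--
--         if first >= K:
--             return result
--
--         if scoville:
--             heapq.heappush(scoville, first + heapq.heappop(scoville) * 2)
--             result += 1
--
--     return -1
-- ===== SOURCE B (Python) =====
-- def solution(scoville, K):
--     scoville.sort()
--     mixed = []          # queue of mixed values; provably kept in nondecreasing order
--     i = 0               # front of the sorted input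
--     j = 0               # front of the mix queue
--     result = 0
--
--     def take():
--         # pop the smaller of the two queue fronts
--         nonlocal i, j
--         if j >= len(mixed) or (i < len(scoville) and scoville[i] <= mixed[j]):
--             v = scoville[i]
--             i += 1
--         else:
--             v = mixed[j]
--             j += 1
--         return v
--
--     while i < len(scoville) or j < len(mixed):
--         first = take()
--         if first >= K:
--             return result
--         if i < len(scoville) or j < len(mixed):
--             second = take()
--             mixed.append(first + second * 2)
--             result += 1
--     return -1
-- ===== Notes on version B (the rewrite author's own statement) =====
-- stated objective: faster
-- what changed: Replaces the binary heap (heapify/heappop/heappush) by sort-once plus two front-pointer queues: the sorted input and a FIFO queue of mixed values that provably stays nondecreasing, so each pop is O(1) instead of O(log n).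
import Mathlib
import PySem

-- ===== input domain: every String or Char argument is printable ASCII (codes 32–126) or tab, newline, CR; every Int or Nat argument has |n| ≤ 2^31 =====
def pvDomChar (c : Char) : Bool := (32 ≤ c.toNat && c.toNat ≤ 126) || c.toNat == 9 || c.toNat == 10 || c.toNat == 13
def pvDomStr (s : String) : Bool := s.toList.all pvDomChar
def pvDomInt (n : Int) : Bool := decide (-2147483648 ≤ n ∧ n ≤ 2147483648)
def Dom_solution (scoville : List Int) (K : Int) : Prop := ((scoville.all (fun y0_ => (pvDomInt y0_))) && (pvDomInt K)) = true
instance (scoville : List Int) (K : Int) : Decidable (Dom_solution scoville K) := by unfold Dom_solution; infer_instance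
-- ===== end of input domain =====

-- B replaces A's binary heap by a sort + two-queue scheme (sorted input scanned by a front
-- pointer, plus a FIFO queue of mixed values that provably stays in nondecreasing order);
-- equivalence is about the RETURN value only: A heapifies its argument in place, B sorts it in place.

-- ===== PORT A =====
-- A keeps `scoville` as a heapq min-heap; observably heappop removes-and-returns a minimal
-- element and heappush adds one, so the port carries the list and models heappop as
-- remove-first-minimum (PySem.List.min? / remove?) — exact on the returned value.
def solutionGoA (heap : List Int) (K result : Int) : Int :=
  match hm : PySem.List.min? heap (fun x => x) with
  | none => -1                                      -- while loop exits: empty heap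
  | some first =>
    match hr : PySem.List.remove? heap first with
    | none => -1                                    -- unreachable: first ∈ heap
    | some rest =>
      if first ≥ K then result
      else
        match h2 : PySem.List.min? rest (fun x => x) with
        | none => -1                                -- `if scoville:` false, loop re-tests empty list
        | some second =>
          match hr2 : PySem.List.remove? rest second with
          | none => -1                              -- unreachable: second ∈ rest
          | some rest2 =>
            solutionGoA (rest2 ++ [first + second * 2]) K (result + 1)
termination_by heap.length
decreasing_by
  have h1 : first ∈ heap := PySem.List.min?_mem hm
  have h2m : second ∈ rest := PySem.List.min?_mem h2
  have e1 : rest = heap.erase first := by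
    have := PySem.List.remove?_eq_some_erase heap first h1
    rw [hr] at this; exact (Option.some.injEq _ _).mp this.symm |>.symm
  have e2 : rest2 = rest.erase second := by
    have := PySem.List.remove?_eq_some_erase rest second h2m
    rw [hr2] at this; exact (Option.some.injEq _ _).mp this.symm |>.symm
  have l1 : rest.length = heap.length - 1 := by rw [e1]; exact List.length_erase_of_mem h1
  have l2 : rest2.length = rest.length - 1 := by rw [e2]; exact List.length_erase_of_mem h2m
  have p1 : 0 < heap.length := List.length_pos_of_mem h1
  have p2 : 0 < rest.length := List.length_pos_of_mem h2m
  simp [List.length_append, l2, l1]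
  omega

def solution (scoville : List Int) (K : Int) : Int :=
  solutionGoA scoville K 0

-- ===== PORT B =====
-- Source B's take(): pop the smaller of the two queue fronts (S = suffix scoville[i:] of the
-- sorted input, M = suffix mixed[j:] of the mix queue; advancing an index = dropping a head).
def takeB (S M : List Int) : Option (Int × List Int × List Int) :=
  match S, M with
  | [], [] => none
  | a :: S', [] => some (a, S', [])
  | [], b :: M' => some (b, [], M')
  | a :: S', b :: M' => if a ≤ b then some (a, S', b :: M') else some (b, a :: S', M')

theorem takeB_length {S M S1 M1 : List Int} {v : Int}
    (h : takeB S M = some (v, S1, M1)) : S1.length + M1.length + 1 = S.length + M.length := by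
  match S, M with
  | [], [] => simp [takeB] at h
  | a :: S', [] => simp [takeB] at h; obtain ⟨-, rfl, rfl⟩ := h; simp
  | [], b :: M' => simp [takeB] at h; obtain ⟨-, rfl, rfl⟩ := h; simp
  | a :: S', b :: M' =>
    simp only [takeB] at h
    split at h <;> (simp at h; obtain ⟨-, rfl, rfl⟩ := h; simp) <;> omega

-- Source B's main loop: take `first`, test against K, take `second`, append the mix.
def solutionGoB (S M : List Int) (K r : Int) : Int :=
  match ht : takeB S M with
  | none => -1
  | some (first, S1, M1) =>
    if first ≥ K then r
    else
      match ht2 : takeB S1 M1 with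
      | none => -1
      | some (second, S2, M2) =>
        solutionGoB S2 (M2 ++ [first + second * 2]) K (r + 1)
termination_by S.length + M.length
decreasing_by
  have l1 := takeB_length ht
  have l2 := takeB_length ht2
  simp only [List.length_append, List.length_cons, List.length_nil]
  omega

def solution_alt (scoville : List Int) (K : Int) : Int :=
  solutionGoB (PySem.List.sorted scoville (fun x => x)) [] K 0

-- ===== PRECONDITION & SPEC =====
def Spec_solution (scoville : List Int) (K : Int) (out : Int) : Prop := out = solution_alt scoville K
instance (scoville : List Int) (K : Int) (out : Int) : Decidable (Spec_solution scoville K out) := by unfold Spec_solution; infer_instance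

-- ===== CLAIM (what is proved, stated in full; the proofs are below) =====
def Claim_equal_solution : Prop := ∀ (scoville : List Int) (K : Int), Dom_solution scoville K → Spec_solution scoville K (solution scoville K)

-- ===== LEMMAS AND PROOFS =====

theorem takeB_eq_none_iff (S M : List Int) : takeB S M = none ↔ S = [] ∧ M = [] := by
  match S, M with
  | [], [] => simp [takeB]
  | a :: S', [] => simp [takeB]
  | [], b :: M' => simp [takeB]
  | a :: S', b :: M' => simp only [takeB]; split <;> simp

-- Under sortedness of both queues, takeB pops a minimum of S ++ M, and the new state is
-- (S ++ M).erase of it; the leftover queues are sublists of the old ones.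
theorem takeB_spec {S M S1 M1 : List Int} {v : Int}
    (hS : S.Pairwise (· ≤ ·)) (hM : M.Pairwise (· ≤ ·))
    (h : takeB S M = some (v, S1, M1)) :
    v ∈ S ++ M ∧ (∀ x ∈ S ++ M, v ≤ x) ∧ S1 ++ M1 = (S ++ M).erase v ∧
      S1.Sublist S ∧ M1.Sublist M := by
  match S, M with
  | [], [] => simp [takeB] at h
  | a :: S', [] =>
    simp [takeB] at h
    obtain ⟨rfl, rfl, rfl⟩ := h
    refine ⟨by simp, ?_, by simp, List.sublist_cons_self _ _, List.Sublist.refl _⟩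
    intro x hx
    simp at hx
    rcases hx with rfl | hx
    · exact le_refl _
    · exact (List.pairwise_cons.mp hS).1 x hx
  | [], b :: M' =>
    simp [takeB] at h
    obtain ⟨rfl, rfl, rfl⟩ := h
    refine ⟨by simp, ?_, by simp, List.Sublist.refl _, List.sublist_cons_self _ _⟩
    intro x hx
    simp at hx
    rcases hx with rfl | hx
    · exact le_refl _
    · exact (List.pairwise_cons.mp hM).1 x hx
  | a :: S', b :: M' =>
    simp only [takeB] at h
    split at h
    · rename_i hab
      simp at h
      obtain ⟨rfl, rfl, rfl⟩ := h
      refine ⟨by simp, ?_, by simp, List.sublist_cons_self _ _, List.Sublist.refl _⟩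
      intro x hx
      simp at hx
      rcases hx with rfl | hx | rfl | hx
      · exact le_refl _
      · exact (List.pairwise_cons.mp hS).1 x hx
      · exact hab
      · exact le_trans hab ((List.pairwise_cons.mp hM).1 x hx)
    · rename_i hab
      push Not at hab
      simp at h
      obtain ⟨rfl, rfl, rfl⟩ := h
      have hmem : ∀ x ∈ a :: S', b < x := by
        intro x hx
        rcases List.mem_cons.mp hx with rfl | hx
        · exact hab
        · exact lt_of_lt_of_le hab ((List.pairwise_cons.mp hS).1 x hx)
      have hnot : b ∉ a :: S' := fun hv => lt_irrefl b (hmem b hv)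
      refine ⟨by simp, ?_, ?_, List.Sublist.refl _, List.sublist_cons_self _ _⟩
      · intro x hx
        simp at hx
        rcases hx with rfl | hx | rfl | hx
        · exact le_of_lt hab
        · exact le_of_lt (hmem x (by simp [hx]))
        · exact le_refl _
        · exact (List.pairwise_cons.mp hM).1 x hx
      · rw [List.erase_append_right _ hnot, List.erase_cons_head]

-- Everything left in the mix queue after a pop is ≤ 3 · the popped value.
theorem takeB_bound {S M S1 M1 : List Int} {v : Int}
    (hJ1 : ∀ m ∈ M, ∀ x ∈ S, m ≤ 3 * x)
    (hI3 : M.Pairwise (fun p q => q ≤ 3 * p))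
    (h : takeB S M = some (v, S1, M1)) :
    ∀ m ∈ M1, m ≤ 3 * v := by
  match S, M with
  | [], [] => simp [takeB] at h
  | a :: S', [] =>
    simp [takeB] at h
    obtain ⟨rfl, rfl, rfl⟩ := h
    simp
  | [], b :: M' =>
    simp [takeB] at h
    obtain ⟨rfl, rfl, rfl⟩ := h
    exact (List.pairwise_cons.mp hI3).1
  | a :: S', b :: M' =>
    simp only [takeB] at h
    split at h
    · simp at h
      obtain ⟨rfl, rfl, rfl⟩ := h
      intro m hm
      exact hJ1 m hm a (by simp)
    · simp at h
      obtain ⟨rfl, rfl, rfl⟩ := h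
      exact (List.pairwise_cons.mp hI3).1

-- In any permutation of a list with an explicit minimum, min? returns that value.
theorem min?_of_perm_min {h l : List Int} {v : Int} (hp : h.Perm l) (hv : v ∈ l)
    (hmin : ∀ x ∈ l, v ≤ x) : PySem.List.min? h (fun x => x) = some v := by
  match hm : PySem.List.min? h (fun x => x) with
  | none =>
    have hhe : h = [] := (PySem.List.min?_eq_none_iff h _).mp hm
    subst hhe
    have hl : l = [] := hp.symm.eq_nil
    subst hl
    simp at hv
  | some m =>
    have hmh : m ∈ h := PySem.List.min?_mem hm
    have h1 : v ≤ m := hmin m (hp.mem_iff.mp hmh)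
    have h2 : m ≤ v := PySem.List.min?_isMin hm v (hp.mem_iff.mpr hv)
    have : m = v := le_antisymm h2 h1
    rw [this]

-- Step lemmas: unfold one loop iteration of each port under the given scrutinee values.
theorem goA_empty {h : List Int} {K r : Int}
    (h1 : PySem.List.min? h (fun x => x) = none) : solutionGoA h K r = -1 := by
  rw [solutionGoA.eq_def]
  split
  · rfl
  · rename_i v heq; rw [h1] at heq; simp at heq

theorem goA_stop {h rest : List Int} {v K r : Int}
    (h1 : PySem.List.min? h (fun x => x) = some v)
    (h2 : PySem.List.remove? h v = some rest)
    (hK : v ≥ K) : solutionGoA h K r = r := by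
  rw [solutionGoA.eq_def]
  split
  · rename_i heq; rw [h1] at heq; simp at heq
  · rename_i v' heq
    rw [h1] at heq; injection heq with e; subst e
    split
    · rename_i heq2; rw [h2] at heq2; simp at heq2
    · rename_i rest' heq2
      rw [h2] at heq2; injection heq2 with e2; subst e2
      rw [if_pos hK]

theorem goA_dead {h rest : List Int} {v K r : Int}
    (h1 : PySem.List.min? h (fun x => x) = some v)
    (h2 : PySem.List.remove? h v = some rest)
    (hK : ¬ v ≥ K)
    (h3 : PySem.List.min? rest (fun x => x) = none) : solutionGoA h K r = -1 := by
  rw [solutionGoA.eq_def]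
  split
  · rfl
  · rename_i v' heq
    rw [h1] at heq; injection heq with e; subst e
    split
    · rfl
    · rename_i rest' heq2
      rw [h2] at heq2; injection heq2 with e2; subst e2
      rw [if_neg hK]
      split
      · rfl
      · rename_i w heq3; rw [h3] at heq3; simp at heq3

theorem goA_step {h rest rest2 : List Int} {v w K r : Int}
    (h1 : PySem.List.min? h (fun x => x) = some v)
    (h2 : PySem.List.remove? h v = some rest)
    (hK : ¬ v ≥ K)
    (h3 : PySem.List.min? rest (fun x => x) = some w)
    (h4 : PySem.List.remove? rest w = some rest2) :
    solutionGoA h K r = solutionGoA (rest2 ++ [v + w * 2]) K (r + 1) := by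
  rw [solutionGoA.eq_def]
  split
  · rename_i heq; rw [h1] at heq; simp at heq
  · rename_i v' heq
    rw [h1] at heq; injection heq with e; subst e
    split
    · rename_i heq2; rw [h2] at heq2; simp at heq2
    · rename_i rest' heq2
      rw [h2] at heq2; injection heq2 with e2; subst e2
      rw [if_neg hK]
      split
      · rename_i heq3; rw [h3] at heq3; simp at heq3
      · rename_i w' heq3
        rw [h3] at heq3; injection heq3 with e3; subst e3
        split
        · rename_i heq4; rw [h4] at heq4; simp at heq4
        · rename_i rest2' heq4
          rw [h4] at heq4; injection heq4 with e4; subst e4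
          rfl

theorem goB_empty {S M : List Int} {K r : Int}
    (h1 : takeB S M = none) : solutionGoB S M K r = -1 := by
  rw [solutionGoB.eq_def]
  split
  · rfl
  · rename_i v S1 M1 heq; rw [h1] at heq; simp at heq

theorem goB_stop {S M S1 M1 : List Int} {v K r : Int}
    (h1 : takeB S M = some (v, S1, M1)) (hK : v ≥ K) : solutionGoB S M K r = r := by
  rw [solutionGoB.eq_def]
  split
  · rename_i heq; rw [h1] at heq; simp at heq
  · rename_i v' S1' M1' heq
    rw [h1] at heq
    simp at heq
    obtain ⟨rfl, rfl, rfl⟩ := heq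
    rw [if_pos hK]

theorem goB_dead {S M S1 M1 : List Int} {v K r : Int}
    (h1 : takeB S M = some (v, S1, M1)) (hK : ¬ v ≥ K)
    (h2 : takeB S1 M1 = none) : solutionGoB S M K r = -1 := by
  rw [solutionGoB.eq_def]
  split
  · rfl
  · rename_i v' S1' M1' heq
    rw [h1] at heq
    simp at heq
    obtain ⟨rfl, rfl, rfl⟩ := heq
    rw [if_neg hK]
    split
    · rfl
    · rename_i w S2 M2 heq2; rw [h2] at heq2; simp at heq2

theorem goB_step {S M S1 M1 S2 M2 : List Int} {v w K r : Int}
    (h1 : takeB S M = some (v, S1, M1)) (hK : ¬ v ≥ K)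
    (h2 : takeB S1 M1 = some (w, S2, M2)) :
    solutionGoB S M K r = solutionGoB S2 (M2 ++ [v + w * 2]) K (r + 1) := by
  rw [solutionGoB.eq_def]
  split
  · rename_i heq; rw [h1] at heq; simp at heq
  · rename_i v' S1' M1' heq
    rw [h1] at heq
    simp at heq
    obtain ⟨rfl, rfl, rfl⟩ := heq
    rw [if_neg hK]
    split
    · rename_i heq2; rw [h2] at heq2; simp at heq2
    · rename_i w' S2' M2' heq2
      rw [h2] at heq2
      simp at heq2
      obtain ⟨rfl, rfl, rfl⟩ := heq2
      rfl

-- The main simulation: A's heap is a permutation of B's two sorted queues; each iteration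
-- pops the same minimal value on both sides and pushes the same mix, and B's queue
-- invariants (every mix ≤ 3·(any raw element), later mixes ≤ 3·(earlier mixes)) keep the
-- mix queue sorted.
theorem go_eq (n : Nat) : ∀ (h S M : List Int) (K r : Int),
    h.length ≤ n → h.Perm (S ++ M) →
    S.Pairwise (· ≤ ·) → M.Pairwise (· ≤ ·) →
    (∀ m ∈ M, ∀ x ∈ S, m ≤ 3 * x) →
    M.Pairwise (fun p q => q ≤ 3 * p) →
    solutionGoA h K r = solutionGoB S M K r := by
  induction n with
  | zero =>
    intro h S M K r hn hp _ _ _ _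
    have hh : h = [] := List.eq_nil_of_length_eq_zero (Nat.le_zero.mp hn)
    subst hh
    have hsm : S ++ M = [] := hp.symm.eq_nil
    obtain ⟨rfl, rfl⟩ := List.append_eq_nil_iff.mp hsm
    rw [goA_empty ((PySem.List.min?_eq_none_iff _ _).mpr rfl), goB_empty rfl]
  | succ n ih =>
    intro h S M K r hn hp hS hM hJ1 hI3
    cases htake : takeB S M with
    | none =>
      obtain ⟨rfl, rfl⟩ := (takeB_eq_none_iff S M).mp htake
      have hh : h = [] := hp.eq_nil
      subst hh
      rw [goA_empty ((PySem.List.min?_eq_none_iff _ _).mpr rfl), goB_empty rfl]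
    | some t =>
      obtain ⟨v1, S1, M1⟩ := t
      obtain ⟨hv1mem, hv1min, herase1, hS1sub, hM1sub⟩ := takeB_spec hS hM htake
      have hb1 := takeB_bound hJ1 hI3 htake
      have hmin1 : PySem.List.min? h (fun x => x) = some v1 := min?_of_perm_min hp hv1mem hv1min
      have hv1h : v1 ∈ h := hp.mem_iff.mpr hv1mem
      have hrem1 : PySem.List.remove? h v1 = some (h.erase v1) :=
        PySem.List.remove?_eq_some_erase h v1 hv1h
      have hpe1 : (h.erase v1).Perm (S1 ++ M1) := by
        have := hp.erase v1
        rwa [← herase1] at this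
      by_cases hK : v1 ≥ K
      · rw [goA_stop hmin1 hrem1 hK, goB_stop htake hK]
      · cases htake2 : takeB S1 M1 with
        | none =>
          obtain ⟨rfl, rfl⟩ := (takeB_eq_none_iff S1 M1).mp htake2
          have hnil : h.erase v1 = [] := hpe1.eq_nil
          have hnone2 : PySem.List.min? (h.erase v1) (fun x => x) = none :=
            (PySem.List.min?_eq_none_iff _ _).mpr hnil
          rw [goA_dead hmin1 hrem1 hK hnone2, goB_dead htake hK htake2]
        | some t2 =>
          obtain ⟨v2, S2, M2⟩ := t2
          have hS1 : S1.Pairwise (· ≤ ·) := List.Pairwise.sublist hS1sub hS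
          have hM1 : M1.Pairwise (· ≤ ·) := List.Pairwise.sublist hM1sub hM
          obtain ⟨hv2mem, hv2min, herase2, hS2sub, hM2sub⟩ := takeB_spec hS1 hM1 htake2
          have hJ1' : ∀ m ∈ M1, ∀ x ∈ S1, m ≤ 3 * x := fun m hm x hx =>
            hJ1 m (hM1sub.subset hm) x (hS1sub.subset hx)
          have hI3' : M1.Pairwise (fun p q => q ≤ 3 * p) := List.Pairwise.sublist hM1sub hI3
          have hmin2 : PySem.List.min? (h.erase v1) (fun x => x) = some v2 :=
            min?_of_perm_min hpe1 hv2mem hv2min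
          have hv2h : v2 ∈ h.erase v1 := hpe1.mem_iff.mpr hv2mem
          have hrem2 : PySem.List.remove? (h.erase v1) v2 = some ((h.erase v1).erase v2) :=
            PySem.List.remove?_eq_some_erase _ v2 hv2h
          have hpe2 : ((h.erase v1).erase v2).Perm (S2 ++ M2) := by
            have := hpe1.erase v2
            rwa [← herase2] at this
          have hv12 : v1 ≤ v2 := by
            refine hv1min v2 ?_
            rcases List.mem_append.mp hv2mem with hmm | hmm
            · exact List.mem_append.mpr (Or.inl (hS1sub.subset hmm))
            · exact List.mem_append.mpr (Or.inr (hM1sub.subset hmm))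
          rw [goA_step hmin1 hrem1 hK hmin2 hrem2, goB_step htake hK htake2]
          apply ih
          · have l0 : h.length = (S ++ M).length := hp.length_eq
            have l1 := takeB_length htake
            have l2 := takeB_length htake2
            have l3 : ((h.erase v1).erase v2).length = (S2 ++ M2).length := hpe2.length_eq
            simp only [List.length_append] at l0 l3 ⊢
            simp only [List.length_cons, List.length_nil]
            omega
          · have hap : (((h.erase v1).erase v2) ++ [v1 + v2 * 2]).Perm
                ((S2 ++ M2) ++ [v1 + v2 * 2]) := hpe2.append_right _
            rwa [List.append_assoc] at hap
          · exact List.Pairwise.sublist hS2sub hS1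
          · rw [List.pairwise_append]
            refine ⟨List.Pairwise.sublist hM2sub hM1, by simp, ?_⟩
            intro m hm y hy
            simp at hy; subst hy
            have hmv1 : m ≤ 3 * v1 := hb1 m (hM2sub.subset hm)
            omega
          · intro m hm x hx
            rcases List.mem_append.mp hm with hm' | hm'
            · exact hJ1' m (hM2sub.subset hm') x (hS2sub.subset hx)
            · simp at hm'; subst hm'
              have hvx : v2 ≤ x := hv2min x (List.mem_append.mpr (Or.inl (hS2sub.subset hx)))
              omega
          · rw [List.pairwise_append]
            refine ⟨List.Pairwise.sublist hM2sub hI3', by simp, ?_⟩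
            intro p hp' y hy
            simp at hy; subst hy
            have hvp : v2 ≤ p := hv2min p (List.mem_append.mpr (Or.inr (hM2sub.subset hp')))
            omega

-- ===== VERDICT (by name: the statement is the Claim_ definition above) =====
theorem solution_spec : Claim_equal_solution := by
  intro scoville K _
  unfold Spec_solution solution solution_alt
  apply go_eq scoville.length scoville (PySem.List.sorted scoville (fun x => x)) [] K 0 le_rfl
  · rw [List.append_nil]
    exact (PySem.List.sorted_perm scoville (fun x => x) false).symm
  · exact PySem.List.sorted_pairwise scoville (fun x => x)
  · exact List.Pairwise.nil
  · intro m hm; simp at hm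
  · exact List.Pairwise.nil
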